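-- pv_equiv track=rewrite | github.com/iqrahapp/iqrah-mobile | research_and_dev/iqrah-audio/archive/src/iqrah_audio/analysis/phoneme_simple.py | detect_tajweed_rule
-- ===== SOURCE A (Python) =====
-- def detect_tajweed_rule(syllable: str) -> str:
--     """
--     Detect Tajweed rule from syllable.
--
--     Args:
--         syllable: Syllable string
--
--     Returns:
--         Tajweed rule name or None
--     """
--     syl_lower = syllable.lower()
--
--     # Madd (long vowels)
--     if any(long in syl_lower for long in ['aa', 'ee', 'oo', 'ii', 'uu']):
--         return 'madd'
--
--     # Shadda (doubled consonants)
--     if any(c*2 in syl_lower for c in 'lmnrtdbszkhg'):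
--         return 'shadda'
--
--     # Ghunnah (nasal sounds)
--     if 'm' in syl_lower or 'n' in syl_lower:
--         return 'ghunnah'
--
--     return None
-- ===== SOURCE B (Python) =====
-- def detect_tajweed_rule(syllable: str) -> str:
--     """One adjacency scan instead of 17 substring searches; same madd > shadda > ghunnah priority."""
--     s = syllable.lower()
--     prev = None
--     madd = shadda = nasal = False
--     for c in s:
--         if c == prev and c in 'aeiou':
--             madd = True
--         if c == prev and c not in 'aeiou' and c in 'lmnrtdbszkhg':
--             shadda = True
--         if c == 'm' or c == 'n':
--             nasal = True
--         prev = c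
--     if madd:
--         return 'madd'
--     if shadda:
--         return 'shadda'
--     if nasal:
--         return 'ghunnah'
--     return None
-- ===== Notes on version B (the rewrite author's own statement) =====
-- stated objective: alternative
-- what changed: Replaces the 17 separate substring searches (5 doubled vowels + 12 doubled consonants, plus two char searches) with one left-to-right pass over adjacent character pairs that records madd/shadda/nasal flags and then applies the same priority order.
import Mathlib
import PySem

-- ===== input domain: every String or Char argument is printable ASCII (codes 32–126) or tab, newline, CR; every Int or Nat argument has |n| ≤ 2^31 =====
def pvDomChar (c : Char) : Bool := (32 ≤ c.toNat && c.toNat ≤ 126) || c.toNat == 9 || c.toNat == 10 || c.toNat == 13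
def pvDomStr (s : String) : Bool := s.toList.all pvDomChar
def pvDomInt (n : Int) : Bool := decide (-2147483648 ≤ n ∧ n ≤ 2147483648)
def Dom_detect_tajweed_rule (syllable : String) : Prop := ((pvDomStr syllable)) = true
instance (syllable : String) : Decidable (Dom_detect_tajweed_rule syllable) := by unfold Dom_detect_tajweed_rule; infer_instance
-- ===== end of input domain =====

-- B replaces A's 17 substring searches by a single adjacency scan with flags (same priority order); proved equal on all inputs.


-- ===== PORT A =====
def detect_tajweed_rule (syllable : String) : Option String :=
  let syl_lower := PySem.Str.lower syllable
  if (["aa", "ee", "oo", "ii", "uu"] : List String).any (fun lng => PySem.Str.isIn lng syl_lower) then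
    some "madd"
  else if ("lmnrtdbszkhg".toList).any (fun c => PySem.Str.isIn (String.ofList [c, c]) syl_lower) then
    some "shadda"
  else if PySem.Str.isIn "m" syl_lower || PySem.Str.isIn "n" syl_lower then
    some "ghunnah"
  else
    none

-- ===== PORT B =====
def tajweedStep (st : Option Char × Bool × Bool × Bool) (c : Char) : Option Char × Bool × Bool × Bool :=
  let prev := st.1
  let madd := st.2.1 || (some c == prev && "aeiou".toList.contains c)
  let shadda := st.2.2.1 || (some c == prev && !("aeiou".toList.contains c) && "lmnrtdbszkhg".toList.contains c)
  let nasal := st.2.2.2 || (c == 'm' || c == 'n')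
  (some c, madd, shadda, nasal)

def detect_tajweed_rule_alt (syllable : String) : Option String :=
  let st := (PySem.Str.lower syllable).toList.foldl tajweedStep (none, false, false, false)
  if st.2.1 then some "madd"
  else if st.2.2.1 then some "shadda"
  else if st.2.2.2 then some "ghunnah"
  else none

-- ===== PRECONDITION & SPEC =====
def Spec_detect_tajweed_rule (syllable : String) (out : Option String) : Prop := out = detect_tajweed_rule_alt syllable
instance (syllable : String) (out : Option String) : Decidable (Spec_detect_tajweed_rule syllable out) := by unfold Spec_detect_tajweed_rule; infer_instance

-- ===== CLAIM (what is proved, stated in full; the proofs are below) =====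
def Claim_equal_detect_tajweed_rule : Prop := ∀ (syllable : String), Dom_detect_tajweed_rule syllable → Spec_detect_tajweed_rule syllable (detect_tajweed_rule syllable)

-- ===== LEMMAS AND PROOFS =====

/-- `dscan p l` : some adjacent equal pair of `l` consists of a character satisfying `p`. -/
def dscan (p : Char → Bool) : List Char → Bool
  | a :: b :: t => (a == b && p a) || dscan p (b :: t)
  | _ => false

theorem dscan_congr (p q : Char → Bool) (h : ∀ a, p a = q a) : ∀ l, dscan p l = dscan q l
  | [] => rfl
  | [_] => rfl
  | a :: b :: t => by
    simp only [dscan, h a, dscan_congr p q h (b :: t)]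

theorem dscan_or (p q : Char → Bool) : ∀ l, dscan (fun a => p a || q a) l = (dscan p l || dscan q l)
  | [] => rfl
  | [_] => rfl
  | a :: b :: t => by
    simp only [dscan, dscan_or p q (b :: t)]
    cases a == b <;> cases p a <;> cases q a <;> simp

theorem dscan_false : ∀ l, dscan (fun _ => false) l = false
  | [] => rfl
  | [_] => rfl
  | _ :: b :: t => by simp only [dscan, Bool.and_false, Bool.false_or, dscan_false (b :: t)]

/-- substring search for a doubled character = adjacency scan for that character -/
theorem isIn_pair (c : Char) : ∀ l : List Char, PySem.Chars.isIn [c, c] l = dscan (fun a => a == c) l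
  | [] => (PySem.Chars.isIn_eq_false_iff _ _).mpr (fun h => by simpa using h.length_le)
  | [_] => (PySem.Chars.isIn_eq_false_iff _ _).mpr (fun h => by simpa using h.length_le)
  | a :: b :: t => by
    rw [Bool.eq_iff_iff, PySem.Chars.isIn_iff_infix, List.infix_cons_iff,
        ← PySem.Chars.isIn_iff_infix, isIn_pair c (b :: t)]
    simp only [dscan, List.cons_prefix_cons, List.nil_prefix, and_true,
      Bool.or_eq_true, Bool.and_eq_true, beq_iff_eq]
    constructor
    · rintro (⟨h1, h2⟩ | h)
      · exact Or.inl ⟨h1.symm.trans h2, h1.symm⟩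
      · exact Or.inr h
    · rintro (⟨h1, h2⟩ | h)
      · exact Or.inl ⟨h2.symm, h2.symm.trans h1⟩
      · exact Or.inr h

/-- substring search for a single character = membership scan -/
theorem isIn_single (c : Char) : ∀ l : List Char, PySem.Chars.isIn [c] l = l.any (fun a => a == c)
  | [] => (PySem.Chars.isIn_eq_false_iff _ _).mpr (fun h => by simpa using h.length_le)
  | a :: t => by
    rw [Bool.eq_iff_iff, PySem.Chars.isIn_iff_infix, List.infix_cons_iff,
        ← PySem.Chars.isIn_iff_infix, isIn_single c t]
    simp only [List.cons_prefix_cons, List.nil_prefix, and_true,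
      List.any_cons, Bool.or_eq_true, beq_iff_eq]
    constructor
    · rintro (h | h)
      · exact Or.inl h.symm
      · exact Or.inr h
    · rintro (h | h)
      · exact Or.inl h.symm
      · exact Or.inr h

/-- a membership-guarded pair test can read the predicate at either partner of an equal pair -/
theorem pair_pred_swap (f : Char → Bool) (a b : Char) : (a == b && f a) = (b == a && f b) := by
  by_cases h : a = b
  · subst h; simp
  · rw [beq_eq_false_iff_ne.mpr h, beq_eq_false_iff_ne.mpr (Ne.symm h),
      Bool.false_and, Bool.false_and]

/-- the "any doubled char from cs" membership tests collapse into one adjacency scan -/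
theorem any_isIn_pair (cs : List Char) (l : List Char) :
    cs.any (fun c => PySem.Chars.isIn [c, c] l) = dscan (fun a => cs.contains a) l := by
  induction cs with
  | nil =>
    rw [List.any_nil, ← dscan_false l]
    exact (dscan_congr _ _ (fun a => by simp) l).symm
  | cons c cs ih =>
    rw [List.any_cons, ih, isIn_pair, ← dscan_or]
    exact dscan_congr _ _ (fun a => by rw [List.contains_cons]) l

def consO : Option Char → List Char → List Char
  | none, l => l
  | some p, l => p :: l

/-- loop invariant for B's adjacency scan -/
theorem fold_spec :
    ∀ (l : List Char) (p : Option Char) (m sh na : Bool),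
    (l.foldl tajweedStep (p, m, sh, na)).2 =
      (m || dscan (fun a => "aeiou".toList.contains a) (consO p l),
       sh || dscan (fun a => !("aeiou".toList.contains a) && "lmnrtdbszkhg".toList.contains a) (consO p l),
       na || l.any (fun c => c == 'm' || c == 'n')) := by
  intro l
  induction l with
  | nil =>
    intro p m sh na
    cases p <;> simp [consO, dscan]
  | cons c t ih =>
    intro p m sh na
    have hstep : (c :: t).foldl tajweedStep (p, m, sh, na) =
        t.foldl tajweedStep (some c,
          m || (some c == p && "aeiou".toList.contains c),
          sh || (some c == p && !("aeiou".toList.contains c) && "lmnrtdbszkhg".toList.contains c),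
          na || (c == 'm' || c == 'n')) := rfl
    rw [hstep, ih (some c)]
    cases p with
    | none =>
      have hno : (some c == (none : Option Char)) = false := rfl
      simp only [consO, hno, Bool.false_and, Bool.or_false, List.any_cons, Bool.or_assoc]
    | some q =>
      have hsome : (some c == some q) = (c == q) := by simp
      simp only [consO, dscan, hsome]
      rw [Bool.and_assoc,
        pair_pred_swap (fun x => "aeiou".toList.contains x) c q,
        pair_pred_swap (fun x => !("aeiou".toList.contains x) && "lmnrtdbszkhg".toList.contains x) c q]
      simp only [List.any_cons, Bool.or_assoc]

theorem any_or (p q : Char → Bool) (l : List Char) :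
    l.any (fun c => p c || q c) = (l.any p || l.any q) := by
  induction l with
  | nil => rfl
  | cons a t ih =>
    simp only [List.any_cons, ih]
    cases p a <;> cases q a <;> simp

/-- A's madd test on a string = the vowel-double adjacency scan of its character list -/
theorem maddA (s : String) :
    (["aa", "ee", "oo", "ii", "uu"] : List String).any (fun lng => PySem.Str.isIn lng s)
      = dscan (fun a => "aeiou".toList.contains a) s.toList := by
  have h1 : (["aa", "ee", "oo", "ii", "uu"] : List String).any (fun lng => PySem.Str.isIn lng s)
      = (['a', 'e', 'o', 'i', 'u'] : List Char).any (fun c => PySem.Chars.isIn [c, c] s.toList) := by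
    simp only [List.any_cons, List.any_nil, PySem.Str.isIn_eq]
    rfl
  rw [h1, any_isIn_pair]
  apply dscan_congr
  intro a
  have hv : ("aeiou" : String).toList = ['a', 'e', 'i', 'o', 'u'] := rfl
  rw [hv]
  simp only [List.contains_cons, List.contains_nil, Bool.or_false]
  cases a == 'o' <;> cases a == 'i' <;> simp

/-- A's shadda test on a string = the consonant-double adjacency scan of its character list -/
theorem shaddaA (s : String) :
    ("lmnrtdbszkhg".toList).any (fun c => PySem.Str.isIn (String.ofList [c, c]) s)
      = dscan (fun a => !("aeiou".toList.contains a) && "lmnrtdbszkhg".toList.contains a) s.toList := by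
  have h1 : ∀ c : Char, PySem.Str.isIn (String.ofList [c, c]) s = PySem.Chars.isIn [c, c] s.toList := by
    intro c
    rw [PySem.Str.isIn_eq, String.toList_ofList]
  simp only [h1]
  rw [any_isIn_pair]
  apply dscan_congr
  intro a
  by_cases h : ("lmnrtdbszkhg".toList).contains a = true
  · have hm : a ∈ "lmnrtdbszkhg".toList := by simpa using h
    have hmem : a = 'l' ∨ a = 'm' ∨ a = 'n' ∨ a = 'r' ∨ a = 't' ∨ a = 'd' ∨ a = 'b' ∨
        a = 's' ∨ a = 'z' ∨ a = 'k' ∨ a = 'h' ∨ a = 'g' := by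
      simpa using hm
    have hv : ("aeiou".toList.contains a) = false := by
      rcases hmem with rfl|rfl|rfl|rfl|rfl|rfl|rfl|rfl|rfl|rfl|rfl|rfl <;> decide
    rw [h, hv]
    rfl
  · rw [Bool.not_eq_true] at h
    rw [h, Bool.and_false]

/-- A's ghunnah test on a string = the nasal membership scan of its character list -/
theorem ghunnahA (s : String) :
    (PySem.Str.isIn "m" s || PySem.Str.isIn "n" s) = s.toList.any (fun c => c == 'm' || c == 'n') := by
  rw [any_or, PySem.Str.isIn_eq, PySem.Str.isIn_eq,
    show ("m" : String).toList = ['m'] from rfl, show ("n" : String).toList = ['n'] from rfl,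
    isIn_single, isIn_single]

-- ===== VERDICT (by name: the statement is the Claim_ definition above) =====
theorem detect_tajweed_rule_spec : Claim_equal_detect_tajweed_rule := by
  intro syllable _
  simp only [Spec_detect_tajweed_rule, detect_tajweed_rule, detect_tajweed_rule_alt]
  rw [fold_spec]
  simp only [consO, Bool.false_or]
  rw [maddA, shaddaA, ghunnahA]
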